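-- pv_equiv track=rewrite | github.com/mpaya5/conquerX-master-solidity | Python/projects/exams_01/first_group.py | max_min_product
-- ===== SOURCE A (Python) =====
-- def max_min_product(nums):
--     max_num = nums[0]
--     min_num = nums[0]
--
--     for num in nums:
--         if num > max_num:
--             max_num = num
--         if num < min_num:
--             min_num = num
--
--     return max_num * min_num
-- ===== SOURCE B (Python) =====
-- def max_min_product(nums):
--     s = sorted(nums)
--     return s[0] * s[-1]
-- ===== Notes on version B (the rewrite author's own statement) =====
-- stated objective: simpler
-- what changed: Replaces A's combined min/max scan with explicit comparisons and two accumulators by sorting the list once and multiplying its first and last elements.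
import Mathlib
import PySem

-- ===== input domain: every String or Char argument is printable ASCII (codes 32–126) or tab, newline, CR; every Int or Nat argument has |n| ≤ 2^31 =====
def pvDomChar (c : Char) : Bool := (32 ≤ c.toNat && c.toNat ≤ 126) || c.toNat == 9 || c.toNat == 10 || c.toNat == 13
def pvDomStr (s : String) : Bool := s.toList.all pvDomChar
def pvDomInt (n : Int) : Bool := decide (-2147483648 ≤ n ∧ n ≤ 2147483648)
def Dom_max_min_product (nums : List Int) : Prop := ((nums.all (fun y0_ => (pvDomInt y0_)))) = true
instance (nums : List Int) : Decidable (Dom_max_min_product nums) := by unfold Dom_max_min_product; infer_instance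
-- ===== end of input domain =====

-- B sorts the list once and multiplies its first and last elements instead of A's two-accumulator scan (objective: simpler).

-- ===== PORT A =====
-- A: seed max_num/min_num with nums[0] (IndexError on []), then one scan updating both.
def max_min_product (nums : List Int) : Int :=
  match nums with
  | [] => 0  -- unreachable under Pre_ (Python raises IndexError here)
  | x :: _ =>
    let st := nums.foldl
      (fun (p : Int × Int) num =>
        (if num > p.1 then num else p.1, if num < p.2 then num else p.2))
      (x, x)
    st.1 * st.2

-- ===== PORT B =====
-- B: s = sorted(nums); return s[0] * s[-1]
def max_min_product_alt (nums : List Int) : Int :=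
  let s := PySem.List.sorted nums (fun x => x) false
  ((PySem.List.pyGet? s 0).getD 0) * ((PySem.List.pyGet? s (-1)).getD 0)

-- ===== PRECONDITION & SPEC =====
-- Pre_ excludes the empty list, on which the Python A raises IndexError (nums[0]).
def Pre_max_min_product (nums : List Int) : Prop := nums ≠ []
instance (nums : List Int) : Decidable (Pre_max_min_product nums) := by unfold Pre_max_min_product; infer_instance
def pvWitness_max_min_product : List Int := [3, -1, 4]

def Spec_max_min_product (nums : List Int) (out : Int) : Prop := out = max_min_product_alt nums
instance (nums : List Int) (out : Int) : Decidable (Spec_max_min_product nums out) := by unfold Spec_max_min_product; infer_instance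

-- ===== CLAIM =====
def Claim_equal_max_min_product : Prop := ∀ (nums : List Int), Dom_max_min_product nums → Pre_max_min_product nums → Spec_max_min_product nums (max_min_product nums)

-- ===== LEMMAS AND PROOFS =====

-- A's pair fold splits into a max-fold and a min-fold.
lemma foldl_pair_split (l : List Int) (a b : Int) :
    l.foldl (fun (p : Int × Int) num =>
      (if num > p.1 then num else p.1, if num < p.2 then num else p.2)) (a, b)
    = (l.foldl (fun m num => if num > m then num else m) a,
       l.foldl (fun m num => if num < m then num else m) b) := by
  induction l generalizing a b with
  | nil => rfl
  | cons x xs ih => simp [List.foldl_cons, ih]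

-- the max-fold is an upper bound of the seed and all elements, and is one of them
lemma foldl_max_spec (l : List Int) (a : Int) :
    a ≤ l.foldl (fun m num => if num > m then num else m) a ∧
    (∀ y ∈ l, y ≤ l.foldl (fun m num => if num > m then num else m) a) ∧
    (l.foldl (fun m num => if num > m then num else m) a = a ∨
     l.foldl (fun m num => if num > m then num else m) a ∈ l) := by
  induction l generalizing a with
  | nil => simp
  | cons x xs ih =>
    simp only [List.foldl_cons]
    by_cases h : x > a
    · simp only [if_pos h]
      obtain ⟨h1, h2, h3⟩ := ih x
      refine ⟨by omega, ?_, ?_⟩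
      · intro y hy; rcases List.mem_cons.1 hy with rfl | hy
        · exact h1
        · exact h2 y hy
      · rcases h3 with h3 | h3 <;> simp [h3]
    · simp only [if_neg h]
      obtain ⟨h1, h2, h3⟩ := ih a
      refine ⟨h1, ?_, ?_⟩
      · intro y hy; rcases List.mem_cons.1 hy with rfl | hy
        · omega
        · exact h2 y hy
      · rcases h3 with h3 | h3 <;> simp [h3]

lemma foldl_min_spec (l : List Int) (a : Int) :
    l.foldl (fun m num => if num < m then num else m) a ≤ a ∧
    (∀ y ∈ l, l.foldl (fun m num => if num < m then num else m) a ≤ y) ∧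
    (l.foldl (fun m num => if num < m then num else m) a = a ∨
     l.foldl (fun m num => if num < m then num else m) a ∈ l) := by
  induction l generalizing a with
  | nil => simp
  | cons x xs ih =>
    simp only [List.foldl_cons]
    by_cases h : x < a
    · simp only [if_pos h]
      obtain ⟨h1, h2, h3⟩ := ih x
      refine ⟨by omega, ?_, ?_⟩
      · intro y hy; rcases List.mem_cons.1 hy with rfl | hy
        · exact h1
        · exact h2 y hy
      · rcases h3 with h3 | h3 <;> simp [h3]
    · simp only [if_neg h]
      obtain ⟨h1, h2, h3⟩ := ih a
      refine ⟨h1, ?_, ?_⟩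
      · intro y hy; rcases List.mem_cons.1 hy with rfl | hy
        · omega
        · exact h2 y hy
      · rcases h3 with h3 | h3 <;> simp [h3]

-- the last element of a (≤)-sorted list bounds every element
lemma pairwise_le_getLast (s : List Int) (hs : s.Pairwise (· ≤ ·)) (h : s ≠ []) :
    ∀ y ∈ s, y ≤ s.getLast h := by
  induction s with
  | nil => exact absurd rfl h
  | cons x xs ih =>
    intro y hy
    rcases List.mem_cons.1 hy with rfl | hy
    · cases xs with
      | nil => simp [List.getLast]
      | cons z zs =>
        have : y ≤ (z :: zs).getLast (by simp) :=
          (List.pairwise_cons.1 hs).1 _ (List.getLast_mem _)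
        simpa [List.getLast_cons] using this
    · cases xs with
      | nil => simp at hy
      | cons z zs =>
        have := ih (List.pairwise_cons.1 hs).2 (by simp) y hy
        simpa [List.getLast_cons] using this

theorem max_min_product_eq (nums : List Int) (h : nums ≠ []) :
    max_min_product nums = max_min_product_alt nums := by
  obtain ⟨x, xs, rfl⟩ := List.exists_cons_of_ne_nil h
  set l := x :: xs with hl
  set s := PySem.List.sorted l (fun y => y) false with hsdef
  have hperm : s.Perm l := PySem.List.sorted_perm l (fun y => y) false
  have hsne : s ≠ [] := by
    intro hnil
    have := hperm.length_eq
    simp [hnil, hl] at this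
  obtain ⟨m, t, hst⟩ := List.exists_cons_of_ne_nil hsne
  have hpw : s.Pairwise (fun a b => a ≤ b) := PySem.List.sorted_pairwise l (fun y => y)
  -- head of s is a lower bound of l; last of s an upper bound
  have hheadlb : ∀ y ∈ l, m ≤ y := by
    intro y hy
    simpa using PySem.List.key_head_sorted_le (xs := l) (key := fun y => y) (hsdef.symm.trans hst) y hy
  have hlastub : ∀ y ∈ l, y ≤ s.getLast hsne := by
    intro y hy
    exact pairwise_le_getLast s hpw hsne y (hperm.mem_iff.2 hy)
  have hmem_m : m ∈ l := hperm.mem_iff.1 (by simp [hst])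
  have hmem_last : s.getLast hsne ∈ l := hperm.mem_iff.1 (List.getLast_mem hsne)
  -- A's fold
  have hA : max_min_product l =
      (l.foldl (fun m num => if num > m then num else m) x) *
      (l.foldl (fun m num => if num < m then num else m) x) := by
    simp only [max_min_product, hl, foldl_pair_split]
  obtain ⟨hMx, hMub, hMmem⟩ := foldl_max_spec l x
  obtain ⟨hmx, hmlb, hmmem⟩ := foldl_min_spec l x
  have hxl : x ∈ l := by simp [hl]
  have hMmem' : l.foldl (fun m num => if num > m then num else m) x ∈ l := by
    rcases hMmem with h' | h'
    · rw [h']; exact hxl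
    · exact h'
  have hmmem' : l.foldl (fun m num => if num < m then num else m) x ∈ l := by
    rcases hmmem with h' | h'
    · rw [h']; exact hxl
    · exact h'
  -- identify extrema
  have hmin : l.foldl (fun m num => if num < m then num else m) x = m :=
    le_antisymm (hmlb m hmem_m) (hheadlb _ hmmem')
  have hmax : l.foldl (fun m num => if num > m then num else m) x = s.getLast hsne :=
    le_antisymm (hlastub _ hMmem') (hMub _ hmem_last)
  -- B's value
  have hB : max_min_product_alt l = m * s.getLast hsne := by
    simp only [max_min_product_alt, ← hsdef]
    rw [PySem.List.pyGet?_neg_one, PySem.List.pyGet?_zero]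
    rw [List.getLast?_eq_some_getLast hsne]
    simp [hst]
  rw [hA, hB, hmin, hmax, mul_comm]

-- ===== VERDICT =====
theorem max_min_product_spec : Claim_equal_max_min_product := by
  intro nums _ hpre
  exact max_min_product_eq nums hpre
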